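-- pv_equiv track=rewrite | github.com/joshball/airboss | tools/handbook-ingest/ingest/cli.py | _find_heading_in_body
-- ===== SOURCE A (Python) =====
-- def _find_heading_in_body(body: str, title: str, start: int) -> int | None:
--     """Locate `title` as a standalone line at-or-after `start` in `body`.
--
--     Tries three forms in order:
--
--     1. Exact / case-insensitive line-anchored match (most PHAK headings).
--     2. Two-line wrapped match: PHAK occasionally wraps a long heading
--        onto two consecutive lines (`"Wind and Pressure Representation on
--        Surface" + "Weather Maps"`); join the line with the next line and
--        compare to the squashed title.
--     3. Whitespace-collapsed prefix match (em-spaces, mid-heading wraps).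
--
--     Returns the byte offset of the heading line within `body`, or None.
--     """
--     norm_title = " ".join(title.split())
--     if not norm_title:
--         return None
--     needle_lower = norm_title.lower()
--     title_squashed = needle_lower.replace(" ", "")
--
--     # Form 1: line-anchored exact / case-insensitive scan.
--     line_start = start
--     while line_start < len(body):
--         line_end = body.find("\n", line_start)
--         if line_end == -1:
--             line_end = len(body)
--         line = body[line_start:line_end].strip()
--         if line and (line == norm_title or line.lower() == needle_lower):
--             return line_start
--         line_start = line_end + 1
--
--     # Form 2: two-line wrap. Walk lines and join each with its next line
--     # (and the line after, for three-line wraps); compare squashed forms.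
--     line_offsets: list[int] = []
--     line_starts = start
--     while line_starts < len(body):
--         line_offsets.append(line_starts)
--         nxt = body.find("\n", line_starts)
--         if nxt == -1:
--             break
--         line_starts = nxt + 1
--     for i, off in enumerate(line_offsets):
--         line_end = body.find("\n", off)
--         if line_end == -1:
--             line_end = len(body)
--         line = body[off:line_end].strip()
--         if not line:
--             continue
--         # Try joining 1, 2, or 3 consecutive lines.
--         for span in (2, 3):
--             if i + span - 1 >= len(line_offsets):
--                 break
--             tail_end_idx = i + span - 1
--             tail_end = body.find("\n", line_offsets[tail_end_idx])
--             if tail_end == -1: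
--                 tail_end = len(body)
--             joined = body[off:tail_end]
--             squashed = "".join(joined.split()).lower()
--             if squashed == title_squashed:
--                 return off
--
--     # Form 3: whitespace-collapsed prefix match.
--     line_start = start
--     while line_start < len(body):
--         line_end = body.find("\n", line_start)
--         if line_end == -1:
--             line_end = len(body)
--         line = body[line_start:line_end].strip()
--         if line:
--             squashed = "".join(line.split()).lower()
--             if squashed.startswith(title_squashed) and len(squashed) <= len(title_squashed) + 3:
--                 return line_start
--         line_start = line_end + 1
--     return None
-- ===== SOURCE B (Python) =====
-- def _find_heading_in_body(body: str, title: str, start: int) -> int | None: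
--     norm_title = " ".join(title.split())
--     if not norm_title:
--         return None
--     needle_lower = norm_title.lower()
--     title_squashed = needle_lower.replace(" ", "")
--
--     # One pass over the body: per-line records (offset, stripped, squashed-lower).
--     recs = []
--     pos = start
--     n = len(body)
--     while pos < n:
--         end = body.find("\n", pos)
--         if end == -1:
--             end = n
--         line = body[pos:end]
--         recs.append((pos, line.strip(),
--                      "".join(ch for ch in line if not ch.isspace()).lower()))
--         pos = end + 1
--
--     # Single pass with a priority accumulator: best = (form, offset), where a
--     # lower form number wins, and within a form the earliest line wins.  A
--     # form-1 (exact) match at the current line beats everything later, so it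
--     # returns immediately; form-2 (wrap) beats form-3 (prefix) regardless of
--     # position, so a form-2 candidate may overwrite an earlier form-3 one.
--     best = None
--     for i, (off, stripped, sq) in enumerate(recs):
--         if not stripped:
--             continue
--         if stripped.lower() == needle_lower:
--             return off
--         if best is None or best[0] > 2:
--             acc = sq
--             for j in (i + 1, i + 2):
--                 if j >= len(recs):
--                     break
--                 acc += recs[j][2]
--                 if acc == title_squashed:
--                     best = (2, off)
--                     break
--         if best is None:
--             if sq.startswith(title_squashed) and len(sq) <= len(title_squashed) + 3:
--                 best = (3, off)
--     return best[1] if best is not None else None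
-- ===== Notes on version B (the rewrite author's own statement) =====
-- stated objective: alternative
-- what changed: B replaces A's three sequential full scans (exact match, then wrap match, then prefix match) by one scan that builds per-line records and a single left-to-right pass maintaining a best-candidate accumulator (form, offset) under the priority order form1 < form2 < form3, returning immediately on a form-1 hit and otherwise the accumulated minimum.
import Mathlib
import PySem

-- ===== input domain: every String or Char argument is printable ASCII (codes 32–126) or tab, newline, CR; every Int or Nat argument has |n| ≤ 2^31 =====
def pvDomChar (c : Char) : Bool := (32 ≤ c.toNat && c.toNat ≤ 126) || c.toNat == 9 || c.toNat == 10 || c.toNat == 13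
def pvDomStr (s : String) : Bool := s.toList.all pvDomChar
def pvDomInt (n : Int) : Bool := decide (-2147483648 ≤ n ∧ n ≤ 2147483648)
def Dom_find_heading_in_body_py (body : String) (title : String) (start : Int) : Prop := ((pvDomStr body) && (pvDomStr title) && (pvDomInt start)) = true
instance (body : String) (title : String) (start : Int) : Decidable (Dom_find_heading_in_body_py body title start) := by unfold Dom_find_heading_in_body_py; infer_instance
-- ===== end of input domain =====

-- B replaces A's three sequential scans by one line pass building records and a single
-- candidate pass with a best-(form, offset) accumulator; equal return value everywhere.

-- `body.find("\n", p)` followed by `if line_end == -1: line_end = len(body)` — the source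
-- line both A's and B's line loops contain, as a shared helper.
def pvFindNl (cs : List Char) (p : Int) : Int :=
  let nxt := PySem.Chars.findFrom cs ['\n'] p none
  if nxt = -1 then (cs.length : Int) else nxt

-- ===== PORT A =====

-- Each while-loop over line starts recurses on an explicit fuel (cs.length + 2 bounds the
-- number of iterations: every step moves past the next newline).

-- Form 1 while-loop
def pvA_form1 (cs nt ndl : List Char) : Nat → Int → Option Int
  | 0, _ => none
  | fuel + 1, ls =>
    if ls < (cs.length : Int) then
      let le := pvFindNl cs ls
      let line := PySem.Chars.strip (PySem.List.slice cs (some ls) (some le))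
      if line ≠ [] ∧ (line = nt ∨ PySem.Chars.lower line = ndl) then some ls
      else pvA_form1 cs nt ndl fuel (le + 1)
    else none

-- Form 2 offset-collecting while-loop
def pvA_offsets (cs : List Char) : Nat → Int → List Int
  | 0, _ => []
  | fuel + 1, ls =>
    if ls < (cs.length : Int) then
      let nxt := PySem.Chars.findFrom cs ['\n'] ls none
      if nxt = -1 then [ls] else ls :: pvA_offsets cs fuel (nxt + 1)
    else []

-- Form 2 for-loop over the collected offsets ("for span in (2, 3)" unrolled as in the source)
def pvA_form2 (cs tsq : List Char) : List Int → Option Int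
  | [] => none
  | off :: rest =>
    let le := pvFindNl cs off
    let line := PySem.Chars.strip (PySem.List.slice cs (some off) (some le))
    if line = [] then pvA_form2 cs tsq rest
    else
      match rest with
      | [] => pvA_form2 cs tsq rest
      | o1 :: rest2 =>
        let te1 := pvFindNl cs o1
        if PySem.Chars.lower (PySem.Chars.join [] (PySem.Chars.split₀ (PySem.List.slice cs (some off) (some te1)))) = tsq then some off
        else
          match rest2 with
          | [] => pvA_form2 cs tsq rest
          | o2 :: _ =>
            let te2 := pvFindNl cs o2
            if PySem.Chars.lower (PySem.Chars.join [] (PySem.Chars.split₀ (PySem.List.slice cs (some off) (some te2)))) = tsq then some off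
            else pvA_form2 cs tsq rest

-- Form 3 while-loop
def pvA_form3 (cs tsq : List Char) : Nat → Int → Option Int
  | 0, _ => none
  | fuel + 1, ls =>
    if ls < (cs.length : Int) then
      let le := pvFindNl cs ls
      let line := PySem.Chars.strip (PySem.List.slice cs (some ls) (some le))
      if line ≠ [] ∧
          (let squashed := PySem.Chars.lower (PySem.Chars.join [] (PySem.Chars.split₀ line))
           PySem.Chars.startswith squashed tsq = true ∧ squashed.length ≤ tsq.length + 3) then some ls
      else pvA_form3 cs tsq fuel (le + 1)
    else none

def find_heading_in_body_py (body : String) (title : String) (start : Int) : Option Int :=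
  let norm_title := PySem.Chars.join [' '] (PySem.Chars.split₀ title.toList)
  if norm_title = [] then none
  else
    let needle_lower := PySem.Chars.lower norm_title
    let title_squashed := PySem.Chars.replace needle_lower [' '] []
    let cs := body.toList
    match pvA_form1 cs norm_title needle_lower (cs.length + 2) start with
    | some r => some r
    | none =>
      match pvA_form2 cs title_squashed (pvA_offsets cs (cs.length + 2) start) with
      | some r => some r
      | none => pvA_form3 cs title_squashed (cs.length + 2) start

-- ===== PORT B =====

-- one pass: (offset, stripped line, whitespace-squashed lowercased line) records
def pvB_recs (cs : List Char) : Nat → Int → List (Int × List Char × List Char)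
  | 0, _ => []
  | fuel + 1, pos =>
    if pos < (cs.length : Int) then
      let e := pvFindNl cs pos
      let line := PySem.List.slice cs (some pos) (some e)
      (pos, PySem.Chars.strip line,
        PySem.Chars.lower (line.filter (fun c => !PySem.Chars.isspace c))) :: pvB_recs cs fuel (e + 1)
    else []

-- the inner "for j in (i+1, i+2): acc += recs[j][2]; if acc == title_squashed: …" loop:
-- does the squashed text of this line joined with the next one or two lines equal tsq?
def pvB_two (tsq sq : List Char) : List (Int × List Char × List Char) → Bool
  | [] => false
  | (_, _, sq1) :: rest2 =>
    if sq ++ sq1 = tsq then true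
    else
      match rest2 with
      | [] => false
      | (_, _, sq2) :: _ => decide ((sq ++ sq1) ++ sq2 = tsq)

-- the single candidate pass: best is None / (2, off) / (3, off); form 1 returns at once
def pvB_scan (ndl tsq : List Char) (best : Option (Int × Int)) :
    List (Int × List Char × List Char) → Option Int
  | [] => Option.map Prod.snd best
  | (off, st, sq) :: rest =>
    if st = [] then pvB_scan ndl tsq best rest
    else if PySem.Chars.lower st = ndl then some off
    else
      let best' :=
        if ((match best with | none => true | some (f, _) => decide (2 < f)) &&
            pvB_two tsq sq rest) = true
        then some ((2 : Int), off) else best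
      let best'' :=
        if (best'.isNone && PySem.Chars.startswith sq tsq &&
            decide (sq.length ≤ tsq.length + 3)) = true
        then some ((3 : Int), off) else best'
      pvB_scan ndl tsq best'' rest

def find_heading_in_body_py_alt (body : String) (title : String) (start : Int) : Option Int :=
  let norm_title := PySem.Chars.join [' '] (PySem.Chars.split₀ title.toList)
  if norm_title = [] then none
  else
    let needle_lower := PySem.Chars.lower norm_title
    let title_squashed := PySem.Chars.replace needle_lower [' '] []
    pvB_scan needle_lower title_squashed none (pvB_recs body.toList (body.toList.length + 2) start)

-- ===== PRECONDITION & SPEC =====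
def Spec_find_heading_in_body_py (body : String) (title : String) (start : Int) (out : Option Int) : Prop := out = find_heading_in_body_py_alt body title start
instance (body : String) (title : String) (start : Int) (out : Option Int) : Decidable (Spec_find_heading_in_body_py body title start out) := by unfold Spec_find_heading_in_body_py; infer_instance

-- ===== CLAIM (what is proved, stated in full; the proofs are below) =====
def Claim_equal_find_heading_in_body_py : Prop := ∀ (body : String) (title : String) (start : Int), Dom_find_heading_in_body_py body title start → Spec_find_heading_in_body_py body title start (find_heading_in_body_py body title start)

-- ===== LEMMAS AND PROOFS =====

-- proof-only record-based restatements of A's three forms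
def pvF1 (ndl : List Char) : List (Int × List Char × List Char) → Option Int
  | [] => none
  | (off, st, _) :: r =>
    if st ≠ [] ∧ PySem.Chars.lower st = ndl then some off else pvF1 ndl r

def pvF2 (tsq : List Char) : List (Int × List Char × List Char) → Option Int
  | [] => none
  | (off, st, sq) :: rest =>
    if st = [] then pvF2 tsq rest
    else if pvB_two tsq sq rest then some off else pvF2 tsq rest

def pvF3 (tsq : List Char) : List (Int × List Char × List Char) → Option Int
  | [] => none
  | (off, st, sq) :: r =>
    if st ≠ [] ∧ PySem.Chars.startswith sq tsq = true ∧ sq.length ≤ tsq.length + 3 then some off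
    else pvF3 tsq r

-- what pvB_scan computes, as a function of the staged scans and the accumulator
def pvRhs (ndl tsq : List Char) (best : Option (Int × Int))
    (recs : List (Int × List Char × List Char)) : Option Int :=
  match pvF1 ndl recs with
  | some r => some r
  | none =>
    match best with
    | some (f, b) =>
      if f ≤ 2 then some b
      else match pvF2 tsq recs with
           | some r => some r
           | none => some b
    | none =>
      match pvF2 tsq recs with
      | some r => some r
      | none => pvF3 tsq recs


-- clampIdx facts used by the termination argument of every loop below
theorem pv_clampIdx_of_nonneg {n : ℕ} {i : Int} (h0 : 0 ≤ i) (h1 : i ≤ (n : Int)) :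
    PySem.List.clampIdx n i = i.toNat := by
  unfold PySem.List.clampIdx
  rw [if_neg (by omega), Nat.min_def]
  split_ifs <;> omega

theorem pv_clampIdx_le {n : ℕ} {i : Int} (h : i < (n : Int)) :
    i ≤ ((PySem.List.clampIdx n i : ℕ) : Int) ∧ ((PySem.List.clampIdx n i : ℕ) : Int) ≤ n := by
  unfold PySem.List.clampIdx
  split_ifs with h1 h2
  · constructor <;> omega
  · constructor <;> omega
  · rw [Nat.min_def]; split_ifs <;> constructor <;> omega

theorem pv_st_eq {cs : List Char} {p : Int} (h : p < (cs.length : Int)) :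
    (if p < 0 then (if p + (cs.length : Int) < 0 then 0 else p + (cs.length : Int)) else p) =
      ((PySem.List.clampIdx cs.length p : ℕ) : Int) := by
  unfold PySem.List.clampIdx
  split_ifs <;> (try rw [Nat.min_def]) <;> (try split_ifs) <;> omega

-- what `pvFindNl` returns: an int between the clamped start and len(body), pointing at a '\n'
-- unless it is len(body)
theorem pvFindNl_spec (cs : List Char) (p : Int) (h : p < (cs.length : Int)) :
    ((PySem.List.clampIdx cs.length p : Nat) : Int) ≤ pvFindNl cs p ∧ 0 ≤ pvFindNl cs p ∧
      pvFindNl cs p ≤ (cs.length : Int) ∧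
      (pvFindNl cs p < (cs.length : Int) → cs[(pvFindNl cs p).toNat]? = some '\n') := by
  have hc := pv_clampIdx_le (n := cs.length) (i := p) h
  set c : ℕ := PySem.List.clampIdx cs.length p with hcdef
  set q : Int := PySem.Chars.find (List.drop c cs) ['\n'] with hq
  have hq1 : -1 ≤ q := by rw [hq]; exact PySem.Chars.neg_one_le_find _ _
  have hq2 : q ≤ ((List.drop c cs).length : Int) := by rw [hq]; exact PySem.Chars.find_le_length _ _
  rw [List.length_drop] at hq2
  have hval : pvFindNl cs p = if q = -1 then (cs.length : Int) else (c : Int) + q := by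
    unfold pvFindNl PySem.Chars.findFrom
    dsimp only
    rw [pv_st_eq h]
    simp only [Int.toNat_natCast, List.take_length]
    rw [← hcdef, ← hq]
    rw [if_neg (show ¬((cs.length : Int) < (c : Int)) by omega)]
    by_cases hneg : q = -1
    · simp [hneg]
    · simp only [if_neg hneg]
      rw [if_neg (show ¬((c : Int) + q = -1) by omega)]
  rw [hval]
  by_cases hneg : q = -1
  · simp only [if_pos hneg]
    exact ⟨by omega, by omega, le_refl _, fun hlt => absurd hlt (by omega)⟩
  · simp only [if_neg hneg]
    refine ⟨by omega, by omega, by omega, fun _ => ?_⟩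
    have hq0 : 0 ≤ PySem.Chars.find (List.drop c cs) ['\n'] := by rw [← hq]; omega
    have hfs := PySem.Chars.find_spec (s := List.drop c cs) (sub := ['\n']) hq0
    obtain ⟨t, ht⟩ := hfs.1
    rw [← hq] at ht
    have hdd : List.drop (c + q.toNat) cs = '\n' :: t := by
      rw [← List.drop_drop, ← ht]; rfl
    have hidx : ((c : Int) + q).toNat = c + q.toNat := by omega
    rw [hidx, ← Nat.add_zero (c + q.toNat), ← List.getElem?_drop, hdd]
    rfl

-- one-step unfolding of pvB_recs
theorem pvB_recs_eq (cs : List Char) (fuel : Nat) (pos : Int) :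
    pvB_recs cs (fuel + 1) pos =
      if pos < (cs.length : Int) then
        (pos, PySem.Chars.strip (PySem.List.slice cs (some pos) (some (pvFindNl cs pos))),
          PySem.Chars.lower ((PySem.List.slice cs (some pos) (some (pvFindNl cs pos))).filter
            (fun c => !PySem.Chars.isspace c))) :: pvB_recs cs fuel (pvFindNl cs pos + 1)
      else [] := rfl

-- out of range: no records, whatever the fuel
theorem pvB_recs_stop (cs : List Char) (fuel : Nat) (pos : Int)
    (h : ¬ pos < (cs.length : Int)) : pvB_recs cs fuel pos = [] := by
  cases fuel with
  | zero => rfl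
  | succ fuel => rw [pvB_recs_eq, if_neg h]

-- the accumulator invariant: pvB_scan = staged scans merged with best
theorem pvB_scan_eq (ndl tsq : List Char) (best : Option (Int × Int))
    (recs : List (Int × List Char × List Char)) :
    pvB_scan ndl tsq best recs = pvRhs ndl tsq best recs := by
  induction recs generalizing best with
  | nil =>
    match best with
    | none => rfl
    | some (f, b) =>
      simp only [pvB_scan, pvRhs, pvF1, pvF2, Option.map]
      split_ifs <;> rfl
  | cons hd rest ih =>
    obtain ⟨off, st, sq⟩ := hd
    by_cases hst : st = []
    · have hF1 : pvF1 ndl ((off, st, sq) :: rest) = pvF1 ndl rest := by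
        rw [pvF1]; rw [if_neg (by simp [hst])]
      have hF2 : pvF2 tsq ((off, st, sq) :: rest) = pvF2 tsq rest := by
        rw [pvF2, if_pos hst]
      have hF3 : pvF3 tsq ((off, st, sq) :: rest) = pvF3 tsq rest := by
        rw [pvF3]; rw [if_neg (by simp [hst])]
      simp only [pvB_scan]
      rw [if_pos hst, ih]
      simp only [pvRhs, hF1, hF2, hF3]
    · by_cases h1 : PySem.Chars.lower st = ndl
      · have hF1 : pvF1 ndl ((off, st, sq) :: rest) = some off := by
          rw [pvF1, if_pos ⟨hst, h1⟩]
        simp only [pvB_scan]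
        rw [if_neg hst, if_pos h1]
        simp only [pvRhs, hF1]
      · have hF1 : pvF1 ndl ((off, st, sq) :: rest) = pvF1 ndl rest := by
          rw [pvF1]; rw [if_neg (by rintro ⟨-, h⟩; exact h1 h)]
        have hF2 : pvF2 tsq ((off, st, sq) :: rest) =
            if pvB_two tsq sq rest then some off else pvF2 tsq rest := by
          rw [pvF2, if_neg hst]
        have hF3 : pvF3 tsq ((off, st, sq) :: rest) =
            if PySem.Chars.startswith sq tsq = true ∧ sq.length ≤ tsq.length + 3 then some off
            else pvF3 tsq rest := by
          rw [pvF3]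
          by_cases hc : PySem.Chars.startswith sq tsq = true ∧ sq.length ≤ tsq.length + 3
          · rw [if_pos ⟨hst, hc.1, hc.2⟩, if_pos hc]
          · rw [if_neg (by rintro ⟨-, h⟩; exact hc h), if_neg hc]
        simp only [pvB_scan]
        rw [if_neg hst, if_neg h1]
        by_cases h2 : ((match best with | none => true | some (f, _) => decide (2 < f)) &&
            pvB_two tsq sq rest) = true
        · -- the two/three-line check was enabled and matched: best becomes (2, off)
          rw [if_pos h2, if_neg (by simp), ih]
          rw [Bool.and_eq_true] at h2
          simp only [pvRhs, hF1, hF2, h2.2, if_true]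
          cases hF : pvF1 ndl rest
          · simp only []
            rw [if_pos (by omega)]
            match best, h2.1 with
            | none, _ => rfl
            | some (f, b), hf =>
              simp only [decide_eq_true_eq] at hf
              dsimp only
              rw [if_neg (by omega)]
          · rfl
        · rw [if_neg h2]
          match best with
          | some (f, b) =>
            rw [if_neg (by simp), ih]
            simp only [pvRhs, hF1, hF2]
            cases hF : pvF1 ndl rest
            · simp only []
              by_cases hf : f ≤ 2
              · rw [if_pos hf, if_pos hf]
              · -- f > 2, so the check was enabled: pvB_two must have failed
                have hfail : pvB_two tsq sq rest = false := by
                  cases hcon : pvB_two tsq sq rest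
                  · rfl
                  · simp only [hcon, Bool.and_true, decide_eq_true_eq] at h2
                    omega
                rw [if_neg hf, if_neg hf, hfail, if_neg (by simp)]
            · rfl
          | none =>
            -- best still none: pvB_two failed; the form-3 check decides
            have hfail : pvB_two tsq sq rest = false := by
              cases hcon : pvB_two tsq sq rest
              · rfl
              · simp [hcon] at h2
            by_cases h3 : (PySem.Chars.startswith sq tsq &&
                decide (sq.length ≤ tsq.length + 3)) = true
            · rw [Bool.and_eq_true, decide_eq_true_eq] at h3
              rw [if_pos (by simp [h3.1, h3.2]), ih]
              simp only [pvRhs, hF1, hF2, hF3, hfail, if_pos h3]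
              cases hF : pvF1 ndl rest
              · simp only []
                rw [if_neg (by omega), if_neg (by simp)]
              · rfl
            · rw [Bool.and_eq_true, decide_eq_true_eq] at h3
              rw [if_neg (by simpa using h3), ih]
              simp only [pvRhs, hF1, hF2, hF3, hfail]
              rw [if_neg (by simp), if_neg (by rintro ⟨ha, hb⟩; exact h3 ⟨ha, hb⟩)]

theorem pv_flatten_intersperse_nil (l : List (List Char)) :
    (l.intersperse []).flatten = l.flatten := by
  induction l with
  | nil => rfl
  | cons x t ih =>
    cases t with
    | nil => rfl
    | cons y t2 =>
      simp only [List.intersperse, List.flatten_cons] at *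
      simp [ih]

theorem pv_go_flatten (rest cur : List Char) (acc : List (List Char)) :
    (PySem.Chars.split₀.go rest cur acc).flatten =
      acc.reverse.flatten ++ cur.reverse ++ rest.filter (fun c => !PySem.Chars.isspace c) := by
  induction rest generalizing cur acc with
  | nil =>
    by_cases hc : cur.isEmpty
    · simp [PySem.Chars.split₀.go, hc, List.isEmpty_iff.mp hc]
    · simp [PySem.Chars.split₀.go, hc]
  | cons c rest ih =>
    by_cases hs : PySem.Chars.isspace c
    · by_cases hc : cur.isEmpty
      · simp [PySem.Chars.split₀.go, hs, hc, ih, List.isEmpty_iff.mp hc]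
      · simp [PySem.Chars.split₀.go, hs, hc, ih]
    · simp [PySem.Chars.split₀.go, hs, ih]

-- "".join(x.split()) removes exactly the whitespace characters
theorem pv_join_split₀ (xs : List Char) :
    PySem.Chars.join [] (PySem.Chars.split₀ xs) = xs.filter (fun c => !PySem.Chars.isspace c) := by
  simp [PySem.Chars.join, PySem.Chars.split₀, List.intercalate, pv_flatten_intersperse_nil,
    pv_go_flatten]

theorem pv_squash_eq (xs : List Char) :
    PySem.Chars.lower (PySem.Chars.join [] (PySem.Chars.split₀ xs)) =
      PySem.Chars.lower (xs.filter (fun c => !PySem.Chars.isspace c)) := by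
  rw [pv_join_split₀]

theorem pv_filter_dropWhile (l : List Char) :
    (l.dropWhile PySem.Chars.isspace).filter (fun c => !PySem.Chars.isspace c) =
      l.filter (fun c => !PySem.Chars.isspace c) := by
  induction l with
  | nil => rfl
  | cons c t ih =>
    by_cases hs : PySem.Chars.isspace c
    · simp [List.dropWhile_cons, hs, ih]
    · simp [List.dropWhile_cons, hs]

-- stripping does not change the whitespace-free characters
theorem pv_filter_strip (xs : List Char) :
    (PySem.Chars.strip xs).filter (fun c => !PySem.Chars.isspace c) =
      xs.filter (fun c => !PySem.Chars.isspace c) := by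
  simp [PySem.Chars.strip, PySem.Chars.lstrip, PySem.Chars.rstrip, List.filter_reverse,
    pv_filter_dropWhile]

theorem pv_slice_split (cs : List Char) (a m b : Int)
    (ham : ((PySem.List.clampIdx cs.length a : Nat) : Int) ≤ m) (hm : 0 ≤ m) (hmb : m ≤ b)
    (hb : b ≤ (cs.length : Int)) :
    PySem.List.slice cs (some a) (some b) =
      PySem.List.slice cs (some a) (some m) ++ PySem.List.slice cs (some m) (some b) := by
  simp only [PySem.List.slice]
  rw [pv_clampIdx_of_nonneg hm (by omega), pv_clampIdx_of_nonneg (by omega : (0:Int) ≤ b) hb]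
  rw [show b.toNat - PySem.List.clampIdx cs.length a =
      (m.toNat - PySem.List.clampIdx cs.length a) + (b.toNat - m.toNat) by omega]
  rw [List.take_add, List.drop_drop]
  rw [show PySem.List.clampIdx cs.length a + (m.toNat - PySem.List.clampIdx cs.length a) =
      m.toNat by omega]

theorem pv_slice_cons (cs : List Char) (m b : Int) (hm : 0 ≤ m) (hmb : m < b)
    (hb : b ≤ (cs.length : Int)) (hc : cs[m.toNat]? = some '\n') :
    PySem.List.slice cs (some m) (some b) = '\n' :: PySem.List.slice cs (some (m + 1)) (some b) := by
  have hmlen : m.toNat < cs.length := by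
    by_contra hcon
    rw [List.getElem?_eq_none_iff.mpr (by omega)] at hc
    exact absurd hc (by simp)
  simp only [PySem.List.slice]
  rw [pv_clampIdx_of_nonneg hm (by omega), pv_clampIdx_of_nonneg (by omega : (0:Int) ≤ m+1) (by omega),
    pv_clampIdx_of_nonneg (by omega : (0:Int) ≤ b) hb]
  rw [show (m+1).toNat = m.toNat + 1 by omega]
  rw [List.drop_eq_getElem_cons hmlen]
  have hg : cs[m.toNat] = '\n' := by
    rw [List.getElem?_eq_getElem hmlen] at hc; exact Option.some.inj hc
  rw [hg, show b.toNat - m.toNat = (b.toNat - (m.toNat + 1)) + 1 by omega]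
  rw [List.take_succ_cons]

-- Form 1 of A = record scan pvF1
theorem pv_form1_eq (cs nt ndl : List Char) (hndl : PySem.Chars.lower nt = ndl) :
    ∀ (fuel : Nat) (ls : Int), pvA_form1 cs nt ndl fuel ls = pvF1 ndl (pvB_recs cs fuel ls) := by
  intro fuel
  induction fuel with
  | zero => intro ls; rfl
  | succ fuel ih =>
    intro ls
    rw [pvB_recs_eq, pvA_form1]
    by_cases h : ls < (cs.length : Int)
    · rw [if_pos h, if_pos h]
      dsimp only
      by_cases hcond : PySem.Chars.strip (PySem.List.slice cs (some ls) (some (pvFindNl cs ls))) ≠ [] ∧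
          PySem.Chars.lower (PySem.Chars.strip (PySem.List.slice cs (some ls) (some (pvFindNl cs ls)))) = ndl
      · rw [pvF1, if_pos hcond, if_pos ⟨hcond.1, Or.inr hcond.2⟩]
      · have hA : ¬ (PySem.Chars.strip (PySem.List.slice cs (some ls) (some (pvFindNl cs ls))) ≠ [] ∧
            (PySem.Chars.strip (PySem.List.slice cs (some ls) (some (pvFindNl cs ls))) = nt ∨
             PySem.Chars.lower (PySem.Chars.strip (PySem.List.slice cs (some ls) (some (pvFindNl cs ls)))) = ndl)) := by
          rintro ⟨h1, h2 | h3⟩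
          · exact hcond ⟨h1, by rw [h2, hndl]⟩
          · exact hcond ⟨h1, h3⟩
        rw [pvF1, if_neg hcond, if_neg hA]
        exact ih (pvFindNl cs ls + 1)
    · rw [if_neg h, if_neg h]
      rfl

-- the offsets A collects for Form 2 are the offsets of B's records
theorem pv_offsets_eq (cs : List Char) :
    ∀ (fuel : Nat) (ls : Int), pvA_offsets cs fuel ls = (pvB_recs cs fuel ls).map Prod.fst := by
  intro fuel
  induction fuel with
  | zero => intro ls; rfl
  | succ fuel ih =>
    intro ls
    rw [pvB_recs_eq, pvA_offsets]
    by_cases h : ls < (cs.length : Int)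
    · rw [if_pos h, if_pos h]
      dsimp only
      by_cases h2 : PySem.Chars.findFrom cs ['\n'] ls none = -1
      · have he : pvFindNl cs ls = (cs.length : Int) := by simp [pvFindNl, h2]
        rw [if_pos h2, List.map_cons, pvB_recs_stop cs fuel _ (by omega)]
        rfl
      · rw [if_neg h2, List.map_cons]
        have he : pvFindNl cs ls = PySem.Chars.findFrom cs ['\n'] ls none := by
          simp [pvFindNl, h2]
        rw [← he, ih (pvFindNl cs ls + 1)]
    · rw [if_neg h, if_neg h]
      rfl

-- squash of A's joined two-line slice = concatenation of B's per-line squashes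
theorem pv_join2_eq (cs : List Char) (ls : Int) (h : ls < (cs.length : Int))
    (h1 : pvFindNl cs ls + 1 < (cs.length : Int)) :
    PySem.Chars.lower (PySem.Chars.join [] (PySem.Chars.split₀
        (PySem.List.slice cs (some ls) (some (pvFindNl cs (pvFindNl cs ls + 1)))))) =
      PySem.Chars.lower ((PySem.List.slice cs (some ls) (some (pvFindNl cs ls))).filter
          (fun c => !PySem.Chars.isspace c)) ++
        PySem.Chars.lower ((PySem.List.slice cs (some (pvFindNl cs ls + 1))
            (some (pvFindNl cs (pvFindNl cs ls + 1)))).filter (fun c => !PySem.Chars.isspace c)) := by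
  have hs := pvFindNl_spec cs ls h
  have hs1 := pvFindNl_spec cs (pvFindNl cs ls + 1) h1
  have hclamp1 : ((PySem.List.clampIdx cs.length (pvFindNl cs ls + 1) : ℕ) : Int) =
      pvFindNl cs ls + 1 := by
    rw [pv_clampIdx_of_nonneg (by omega) (by omega)]; omega
  rw [pv_squash_eq]
  rw [pv_slice_split cs ls (pvFindNl cs ls) (pvFindNl cs (pvFindNl cs ls + 1)) hs.1 hs.2.1
    (by omega) hs1.2.2.1]
  rw [pv_slice_cons cs (pvFindNl cs ls) (pvFindNl cs (pvFindNl cs ls + 1)) hs.2.1 (by omega)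
    hs1.2.2.1 (hs.2.2.2 (by omega))]
  simp [PySem.Chars.lower, List.filter_append, List.filter_cons,
    (by decide : PySem.Chars.isspace '\n' = true)]

-- squash of A's joined three-line slice = concatenation of B's per-line squashes
theorem pv_join3_eq (cs : List Char) (ls : Int) (h : ls < (cs.length : Int))
    (h1 : pvFindNl cs ls + 1 < (cs.length : Int))
    (h2 : pvFindNl cs (pvFindNl cs ls + 1) + 1 < (cs.length : Int)) :
    PySem.Chars.lower (PySem.Chars.join [] (PySem.Chars.split₀
        (PySem.List.slice cs (some ls)
          (some (pvFindNl cs (pvFindNl cs (pvFindNl cs ls + 1) + 1)))))) =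
      (PySem.Chars.lower ((PySem.List.slice cs (some ls) (some (pvFindNl cs ls))).filter
          (fun c => !PySem.Chars.isspace c)) ++
        PySem.Chars.lower ((PySem.List.slice cs (some (pvFindNl cs ls + 1))
            (some (pvFindNl cs (pvFindNl cs ls + 1)))).filter (fun c => !PySem.Chars.isspace c))) ++
        PySem.Chars.lower ((PySem.List.slice cs (some (pvFindNl cs (pvFindNl cs ls + 1) + 1))
            (some (pvFindNl cs (pvFindNl cs (pvFindNl cs ls + 1) + 1)))).filter
          (fun c => !PySem.Chars.isspace c)) := by
  have hs := pvFindNl_spec cs ls h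
  have hs1 := pvFindNl_spec cs (pvFindNl cs ls + 1) h1
  have hs2 := pvFindNl_spec cs (pvFindNl cs (pvFindNl cs ls + 1) + 1) h2
  have hclamp1 : ((PySem.List.clampIdx cs.length (pvFindNl cs ls + 1) : ℕ) : Int) =
      pvFindNl cs ls + 1 := by
    rw [pv_clampIdx_of_nonneg (by omega) (by omega)]; omega
  have hclamp2 : ((PySem.List.clampIdx cs.length (pvFindNl cs (pvFindNl cs ls + 1) + 1) : ℕ) : Int) =
      pvFindNl cs (pvFindNl cs ls + 1) + 1 := by
    rw [pv_clampIdx_of_nonneg (by omega) (by omega)]; omega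
  rw [pv_squash_eq]
  rw [pv_slice_split cs ls (pvFindNl cs ls) _ hs.1 hs.2.1 (by omega) hs2.2.2.1]
  rw [pv_slice_cons cs (pvFindNl cs ls) _ hs.2.1 (by omega) hs2.2.2.1 (hs.2.2.2 (by omega))]
  rw [pv_slice_split cs (pvFindNl cs ls + 1) (pvFindNl cs (pvFindNl cs ls + 1)) _
    (by omega) hs1.2.1 (by omega) hs2.2.2.1]
  rw [pv_slice_cons cs (pvFindNl cs (pvFindNl cs ls + 1)) _ hs1.2.1 (by omega) hs2.2.2.1
    (hs1.2.2.2 (by omega))]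
  simp [PySem.Chars.lower, List.filter_append, List.filter_cons,
    (by decide : PySem.Chars.isspace '\n' = true)]

-- Form 2 of A (over the offsets) = record scan pvF2
theorem pv_form2_eq (cs tsq : List Char) :
    ∀ (fuel : Nat) (ls : Int),
      pvA_form2 cs tsq ((pvB_recs cs fuel ls).map Prod.fst) = pvF2 tsq (pvB_recs cs fuel ls) := by
  intro fuel
  induction fuel with
  | zero => intro ls; rfl
  | succ fuel ih =>
    intro ls
    by_cases h : ls < (cs.length : Int)
    · rw [pvB_recs_eq cs fuel ls, if_pos h]
      have IH := ih (pvFindNl cs ls + 1)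
      by_cases h1 : pvFindNl cs ls + 1 < (cs.length : Int)
      · cases fuel with
        | zero =>
          -- fuel exhausted: the tail list is empty
          simp only [pvB_recs, List.map_cons, List.map_nil] at IH ⊢
          rw [pvA_form2, pvF2]
          try dsimp only
          by_cases hst : PySem.Chars.strip (PySem.List.slice cs (some ls) (some (pvFindNl cs ls))) = []
          · rw [if_pos hst, if_pos hst]; exact IH
          · rw [if_neg hst, if_neg hst]
            simp only [pvB_two]
            rw [if_neg (by simp)]
            exact IH
        | succ fuel2 =>
          rw [pvB_recs_eq cs fuel2 (pvFindNl cs ls + 1), if_pos h1] at IH ⊢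
          by_cases h2 : pvFindNl cs (pvFindNl cs ls + 1) + 1 < (cs.length : Int)
          · cases fuel2 with
            | zero =>
              simp only [pvB_recs, List.map_cons, List.map_nil] at IH ⊢
              rw [pvA_form2, pvF2]
              try dsimp only
              rw [pv_join2_eq cs ls h h1]
              by_cases hst : PySem.Chars.strip (PySem.List.slice cs (some ls) (some (pvFindNl cs ls))) = []
              · rw [if_pos hst, if_pos hst]; exact IH
              · rw [if_neg hst, if_neg hst]
                simp only [pvB_two]
                by_cases hq2 : PySem.Chars.lower ((PySem.List.slice cs (some ls) (some (pvFindNl cs ls))).filter (fun c => !PySem.Chars.isspace c)) ++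
                    PySem.Chars.lower ((PySem.List.slice cs (some (pvFindNl cs ls + 1)) (some (pvFindNl cs (pvFindNl cs ls + 1)))).filter (fun c => !PySem.Chars.isspace c)) = tsq
                · rw [if_pos hq2, if_pos hq2]; simp
                · rw [if_neg hq2, if_neg hq2, if_neg (by simp)]; exact IH
            | succ fuel3 =>
              rw [pvB_recs_eq cs fuel3 (pvFindNl cs (pvFindNl cs ls + 1) + 1), if_pos h2] at IH ⊢
              simp only [List.map_cons] at IH ⊢
              rw [pvA_form2, pvF2]
              try dsimp only
              rw [pv_join2_eq cs ls h h1, pv_join3_eq cs ls h h1 h2]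
              by_cases hst : PySem.Chars.strip (PySem.List.slice cs (some ls) (some (pvFindNl cs ls))) = []
              · rw [if_pos hst, if_pos hst]; exact IH
              · rw [if_neg hst, if_neg hst]
                simp only [pvB_two]
                by_cases hq2 : PySem.Chars.lower ((PySem.List.slice cs (some ls) (some (pvFindNl cs ls))).filter (fun c => !PySem.Chars.isspace c)) ++
                    PySem.Chars.lower ((PySem.List.slice cs (some (pvFindNl cs ls + 1)) (some (pvFindNl cs (pvFindNl cs ls + 1)))).filter (fun c => !PySem.Chars.isspace c)) = tsq
                · rw [if_pos hq2, if_pos hq2]; simp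
                · rw [if_neg hq2, if_neg hq2]
                  by_cases hq3 : (PySem.Chars.lower ((PySem.List.slice cs (some ls) (some (pvFindNl cs ls))).filter (fun c => !PySem.Chars.isspace c)) ++
                      PySem.Chars.lower ((PySem.List.slice cs (some (pvFindNl cs ls + 1)) (some (pvFindNl cs (pvFindNl cs ls + 1)))).filter (fun c => !PySem.Chars.isspace c))) ++
                      PySem.Chars.lower ((PySem.List.slice cs (some (pvFindNl cs (pvFindNl cs ls + 1) + 1)) (some (pvFindNl cs (pvFindNl cs (pvFindNl cs ls + 1) + 1)))).filter (fun c => !PySem.Chars.isspace c)) = tsq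
                  · rw [if_pos hq3]; simp [hq3]
                  · rw [if_neg hq3]; simp only [hq3, decide_false]
                    rw [if_neg (by simp)]; exact IH
          · rw [pvB_recs_stop cs fuel2 (pvFindNl cs (pvFindNl cs ls + 1) + 1) h2] at IH ⊢
            simp only [List.map_cons, List.map_nil] at IH ⊢
            rw [pvA_form2, pvF2]
            try dsimp only
            rw [pv_join2_eq cs ls h h1]
            by_cases hst : PySem.Chars.strip (PySem.List.slice cs (some ls) (some (pvFindNl cs ls))) = []
            · rw [if_pos hst, if_pos hst]; exact IH
            · rw [if_neg hst, if_neg hst]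
              simp only [pvB_two]
              by_cases hq2 : PySem.Chars.lower ((PySem.List.slice cs (some ls) (some (pvFindNl cs ls))).filter (fun c => !PySem.Chars.isspace c)) ++
                  PySem.Chars.lower ((PySem.List.slice cs (some (pvFindNl cs ls + 1)) (some (pvFindNl cs (pvFindNl cs ls + 1)))).filter (fun c => !PySem.Chars.isspace c)) = tsq
              · rw [if_pos hq2, if_pos hq2]; simp
              · rw [if_neg hq2, if_neg hq2, if_neg (by simp)]; exact IH
      · rw [pvB_recs_stop cs fuel (pvFindNl cs ls + 1) h1] at IH ⊢
        simp only [List.map_cons, List.map_nil] at IH ⊢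
        rw [pvA_form2, pvF2]
        try dsimp only
        by_cases hst : PySem.Chars.strip (PySem.List.slice cs (some ls) (some (pvFindNl cs ls))) = []
        · rw [if_pos hst, if_pos hst]; exact IH
        · rw [if_neg hst, if_neg hst]
          simp only [pvB_two]
          rw [if_neg (by simp)]
          exact IH
    · rw [pvB_recs_stop cs (fuel + 1) ls h]
      rfl

-- Form 3 of A = record scan pvF3
theorem pv_form3_eq (cs tsq : List Char) :
    ∀ (fuel : Nat) (ls : Int), pvA_form3 cs tsq fuel ls = pvF3 tsq (pvB_recs cs fuel ls) := by
  intro fuel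
  induction fuel with
  | zero => intro ls; rfl
  | succ fuel ih =>
    intro ls
    rw [pvB_recs_eq, pvA_form3]
    by_cases h : ls < (cs.length : Int)
    · rw [if_pos h, if_pos h]
      dsimp only
      rw [pvF3]
      have hsq : PySem.Chars.lower (PySem.Chars.join [] (PySem.Chars.split₀
          (PySem.Chars.strip (PySem.List.slice cs (some ls) (some (pvFindNl cs ls)))))) =
          PySem.Chars.lower ((PySem.List.slice cs (some ls) (some (pvFindNl cs ls))).filter
            (fun c => !PySem.Chars.isspace c)) := by
        rw [pv_squash_eq, pv_filter_strip]
      rw [hsq]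
      split_ifs with hcond
      · rfl
      · exact ih (pvFindNl cs ls + 1)
    · rw [if_neg h, if_neg h]
      rfl

-- ===== VERDICT (by name: the statement is the Claim_ definition above) =====
theorem find_heading_in_body_py_spec : Claim_equal_find_heading_in_body_py := by
  intro body title start _
  unfold Spec_find_heading_in_body_py find_heading_in_body_py find_heading_in_body_py_alt
  by_cases hnt : PySem.Chars.join [' '] (PySem.Chars.split₀ title.toList) = []
  · simp only [hnt, if_pos rfl]
    rfl
  · simp only [if_neg hnt]
    rw [pv_form1_eq _ _ _ rfl, pv_offsets_eq, pv_form2_eq, pvB_scan_eq]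
    simp only [pvRhs]
    cases pvF1 (PySem.Chars.lower (PySem.Chars.join [' '] (PySem.Chars.split₀ title.toList))) (pvB_recs body.toList (body.toList.length + 2) start) with
    | some r => rfl
    | none =>
      rw [pv_form3_eq]
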